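-- pv_equiv track=rewrite | github.com/Nahid6475/Memo-Mind | final_defense_project/app.py | get_memory_trend
-- ===== SOURCE A (Python) =====
-- def get_memory_trend(memories):
--     trend = {}
--     for mem in memories:
--         try:
--             date = mem['created_at'][:10]
--             trend[date] = trend.get(date, 0) + 1
--         except:
--             pass
--     return dict(sorted(trend.items())[-30:])
-- ===== SOURCE B (Python) =====
-- from itertools import groupby
--
-- def get_memory_trend(memories):
--     dates = []
--     for mem in memories:
--         try:
--             dates.append(mem['created_at'][:10])
--         except:
--             pass
--     dates.sort()
--     pairs = [(k, sum(1 for _ in g)) for k, g in groupby(dates)]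
--     return dict(pairs[-30:])
-- ===== Notes on version B (the rewrite author's own statement) =====
-- stated objective: alternative
-- what changed: replaces A's hash-aggregate (dict counter) followed by sorting the distinct keys with a sort-then-group strategy: all extracted dates are sorted and contiguous runs are counted with itertools.groupby
import Mathlib
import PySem

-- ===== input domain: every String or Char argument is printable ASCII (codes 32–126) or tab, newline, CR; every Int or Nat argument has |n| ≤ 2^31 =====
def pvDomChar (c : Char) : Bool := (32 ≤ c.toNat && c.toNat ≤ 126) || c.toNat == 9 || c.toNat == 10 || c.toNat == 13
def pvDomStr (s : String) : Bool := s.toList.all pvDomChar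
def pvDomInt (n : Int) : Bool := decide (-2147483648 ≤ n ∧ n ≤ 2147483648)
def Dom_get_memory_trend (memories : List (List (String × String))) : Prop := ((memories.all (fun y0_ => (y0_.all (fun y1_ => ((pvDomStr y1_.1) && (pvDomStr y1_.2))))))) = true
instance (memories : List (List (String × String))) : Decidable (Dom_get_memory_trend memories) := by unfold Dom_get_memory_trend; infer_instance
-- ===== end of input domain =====

-- B replaces A's dict-counting-then-key-sort with sort-all-dates-then-count-contiguous-runs (groupby); same return value, no speed claim.

-- mem['created_at'][:10] under the blanket try/except: `none` = the KeyError branch (pass).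
-- Lookup in the assoc list is first-match, per the dict convention.
def pvExtractDate (mem : List (String × String)) : Option String :=
  (mem.find? (fun p => p.1 == "created_at")).map (fun p => PySem.Str.slice p.2 none (some 10))

-- ===== PORT A =====
def get_memory_trend (memories : List (List (String × String))) : List (String × Int) :=
  let trend := memories.foldl (fun d mem =>
    match pvExtractDate mem with
    | some date => d.insert date (d.getD date 0 + 1)
    | none => d) (PySem.Dict.empty : PySem.Dict String Int)
  let pairs := PySem.List.slice (PySem.List.sorted2 trend.items Prod.fst Prod.snd false) (some (-30)) none
  (pairs.foldl (fun d q => d.insert q.1 q.2) (PySem.Dict.empty : PySem.Dict String Int)).items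

-- ===== PORT B =====
-- hand port of `[(k, sum(1 for _ in g)) for k, g in groupby(dates)]` (run-length grouping of
-- consecutive equal elements); exact because groupby groups equal adjacent elements in order
def rleGo (d : String) (n : Int) : List String → List (String × Int)
  | [] => [(d, n)]
  | x :: xs => if x == d then rleGo d (n + 1) xs else (d, n) :: rleGo x 1 xs

def rleGroup : List String → List (String × Int)
  | [] => []
  | d :: rest => rleGo d 1 rest

def get_memory_trend_alt (memories : List (List (String × String))) : List (String × Int) :=
  let dates := memories.foldl (fun acc mem =>
    match pvExtractDate mem with
    | some date => acc ++ [date]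
    | none => acc) ([] : List String)
  let pairs := rleGroup (PySem.List.sorted dates (fun x => x) false)
  ((PySem.List.slice pairs (some (-30)) none).foldl (fun d q => d.insert q.1 q.2)
    (PySem.Dict.empty : PySem.Dict String Int)).items

-- ===== PRECONDITION & SPEC =====
def Spec_get_memory_trend (memories : List (List (String × String))) (out : List (String × Int)) : Prop := out = get_memory_trend_alt memories
instance (memories : List (List (String × String))) (out : List (String × Int)) : Decidable (Spec_get_memory_trend memories out) := by unfold Spec_get_memory_trend; infer_instance

-- ===== CLAIM (what is proved, stated in full; the proofs are below) =====
def Claim_equal_get_memory_trend : Prop := ∀ (memories : List (List (String × String))), Dom_get_memory_trend memories → Spec_get_memory_trend memories (get_memory_trend memories)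

-- ===== LEMMAS AND PROOFS =====

theorem insertBy_congr {α : Type} (b b' : α → α → Bool) (x : α) :
    ∀ (acc : List α), (∀ c ∈ acc, b x c = b' x c) →
      PySem.List.insertBy b x acc = PySem.List.insertBy b' x acc := by
  intro acc
  induction acc with
  | nil => intro _; rfl
  | cons y ys ih =>
    intro h
    simp only [PySem.List.insertBy]
    rw [h y (by simp)]
    by_cases hb : b' x y = true
    · simp [hb]
    · simp only [Bool.not_eq_true] at hb
      simp [hb, ih (fun c hc => h c (by simp [hc]))]

theorem foldl_insertBy_congr {α : Type} (b b' : α → α → Bool) :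
    ∀ (xs acc : List α), (∀ a ∈ xs, ∀ c, c ∈ acc ∨ c ∈ xs → b a c = b' a c) →
      xs.foldl (fun acc x => PySem.List.insertBy b x acc) acc
        = xs.foldl (fun acc x => PySem.List.insertBy b' x acc) acc := by
  intro xs
  induction xs with
  | nil => intro _ _; rfl
  | cons x xs ih =>
    intro acc h
    simp only [List.foldl_cons]
    rw [insertBy_congr b b' x acc (fun c hc => h x (by simp) c (Or.inl hc))]
    exact ih _ (fun a ha c hc => by
      refine h a (by simp [ha]) c ?_
      rcases hc with hc | hc
      · rcases (PySem.List.mem_insertBy b' x c acc).1 hc with rfl | hc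
        · exact Or.inr (by simp)
        · exact Or.inl hc
      · exact Or.inr (by simp [hc]))

-- on a pair list with distinct first components, Python's default tuple sort is a sort by first component
theorem sorted2_fst_of_nodup (xs : List (String × Int)) (h : (xs.map Prod.fst).Nodup) :
    PySem.List.sorted2 xs Prod.fst Prod.snd false = PySem.List.sorted xs Prod.fst false := by
  rw [PySem.List.sorted_eq_foldl_insertBy]
  unfold PySem.List.sorted2
  simp only [if_neg (by decide : ¬ (false = true))]
  apply foldl_insertBy_congr
  intro a ha c hc
  rcases hc with hc | hc
  · simp at hc
  · by_cases h1 : a.1 < c.1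
    · simp [h1]
    · by_cases h2 : c.1 < a.1
      · simp [h2]
      · have : a.1 = c.1 := le_antisymm (not_lt.1 h2) (not_lt.1 h1)
        have hac : a = c := List.inj_on_of_nodup_map h ha hc this
        subst hac
        simp

theorem dropWhile_all_gt (d : String) :
    ∀ (rest : List String), rest.Pairwise (· ≤ ·) → (∀ x ∈ rest, d ≤ x) →
      ∀ x ∈ rest.dropWhile (· == d), d < x := by
  intro rest
  induction rest with
  | nil => intro _ _ x hx; simp at hx
  | cons y ys ih =>
    intro hp hle x hx
    by_cases hy : y = d
    · subst hy
      rw [List.dropWhile_cons_of_pos (by simp)] at hx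
      exact ih hp.tail (fun z hz => hle z (by simp [hz])) x hx
    · rw [List.dropWhile_cons_of_neg (by simp [hy])] at hx
      have hdy : d < y := lt_of_le_of_ne (hle y (by simp)) (Ne.symm hy)
      rw [List.mem_cons] at hx
      rcases hx with rfl | hx
      · exact hdy
      · exact lt_of_lt_of_le hdy ((List.pairwise_cons.1 hp).1 x hx)

theorem rleGo_spec :
    ∀ (rest : List String) (d : String) (n : Int), rest.Pairwise (· ≤ ·) → (∀ x ∈ rest, d ≤ x) →
      rleGo d n rest = (d, n + rest.count d) :: rleGroup (rest.dropWhile (· == d)) := by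
  intro rest
  induction rest with
  | nil => intro d n _ _; simp [rleGo, rleGroup]
  | cons x xs ih =>
    intro d n hp hle
    by_cases hx : x = d
    · rw [show rleGo d n (x :: xs) = rleGo d (n + 1) xs from by simp [rleGo, hx],
        ih d (n + 1) hp.tail (fun z hz => hle z (by simp [hz])),
        List.dropWhile_cons_of_pos (by simp [hx])]
      have hc : (n + 1) + (xs.count d : Int) = n + ((x :: xs).count d : Int) := by
        rw [List.count_cons]
        simp [hx]
        ring
      rw [hc]
    · have hdx : d < x := lt_of_le_of_ne (hle x (by simp)) (Ne.symm hx)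
      have hcount : (x :: xs).count d = 0 := by
        rw [List.count_eq_zero]
        intro hmem
        rw [List.mem_cons] at hmem
        rcases hmem with rfl | hmem
        · exact hx rfl
        · exact absurd (lt_of_lt_of_le hdx ((List.pairwise_cons.1 hp).1 d hmem)) (lt_irrefl d)
      rw [show rleGo d n (x :: xs) = (d, n) :: rleGo x 1 xs from by simp [rleGo, hx],
        List.dropWhile_cons_of_neg (by simp [hx]), hcount]
      simp [rleGroup]

theorem rleGroup_cons (d : String) (rest : List String) (hp : (d :: rest).Pairwise (· ≤ ·)) :
    rleGroup (d :: rest)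
      = (d, ((d :: rest).count d : Int)) :: rleGroup (rest.dropWhile (· == d)) := by
  rw [show rleGroup (d :: rest) = rleGo d 1 rest from rfl,
    rleGo_spec rest d 1 hp.tail (fun x hx => (List.pairwise_cons.1 hp).1 x hx)]
  simp
  ring

-- count of a non-run-head element is unchanged by dropping the leading run
theorem count_dropWhile_of_ne (d x : String) (rest : List String) (hx : x ≠ d) :
    (d :: rest).count x = (rest.dropWhile (· == d)).count x := by
  have hsplit : rest = rest.takeWhile (· == d) ++ rest.dropWhile (· == d) :=
    (List.takeWhile_append_dropWhile).symm
  have htake : (rest.takeWhile (· == d)).count x = 0 := by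
    rw [List.count_eq_zero]
    intro hmem
    have := List.mem_takeWhile_imp hmem
    simp at this
    exact hx this
  calc (d :: rest).count x = rest.count x := by
        rw [List.count_cons]
        simp [Ne.symm hx]
    _ = (rest.takeWhile (· == d) ++ rest.dropWhile (· == d)).count x := by
        conv_lhs => rw [hsplit]
    _ = (rest.dropWhile (· == d)).count x := by rw [List.count_append, htake, Nat.zero_add]

theorem mem_rleGroup :
    ∀ (s : List String), s.Pairwise (· ≤ ·) → ∀ (p : String × Int),
      (p ∈ rleGroup s ↔ p.1 ∈ s ∧ p.2 = (s.count p.1 : Int))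
  | [] => by intro _ p; simp [rleGroup]
  | d :: rest => by
    intro hp p
    have ht : (rest.dropWhile (· == d)).Pairwise (· ≤ ·) :=
      List.Pairwise.sublist (List.dropWhile_sublist _) hp.tail
    have hih := mem_rleGroup (rest.dropWhile (· == d)) ht p
    have hgt : ∀ x ∈ rest.dropWhile (· == d), d < x :=
      dropWhile_all_gt d rest hp.tail (fun x hx => (List.pairwise_cons.1 hp).1 x hx)
    rw [rleGroup_cons d rest hp]
    rw [List.mem_cons]
    constructor
    · intro hmem
      rcases hmem with rfl | hmem
      · simp
      · rcases hih.1 hmem with ⟨h1, h2⟩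
        have hne : p.1 ≠ d := fun he => absurd (he ▸ hgt p.1 h1) (lt_irrefl d)
        refine ⟨List.mem_cons_of_mem _ ((List.dropWhile_sublist _).mem h1), ?_⟩
        rw [h2, count_dropWhile_of_ne d p.1 rest hne]
    · rintro ⟨h1, h2⟩
      by_cases hpd : p.1 = d
      · left
        have hpe : p = (p.1, p.2) := rfl
        rw [hpe, hpd, h2, hpd]
      · right
        rw [hih]
        have hmem : p.1 ∈ rest.dropWhile (· == d) := by
          rcases List.mem_cons.1 h1 with h | h
          · exact absurd h hpd
          · have hsplit : rest = rest.takeWhile (· == d) ++ rest.dropWhile (· == d) :=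
              (List.takeWhile_append_dropWhile).symm
            rw [hsplit, List.mem_append] at h
            rcases h with h | h
            · have := List.mem_takeWhile_imp h
              simp at this
              exact absurd this hpd
            · exact h
        exact ⟨hmem, by rw [h2, count_dropWhile_of_ne d p.1 rest hpd]⟩
  termination_by s => s.length
  decreasing_by
    simp only [List.length_cons]
    exact Nat.lt_succ_of_le (List.length_dropWhile_le _ _)

theorem rleGroup_pairwise :
    ∀ (s : List String), s.Pairwise (· ≤ ·) →
      (rleGroup s).Pairwise (fun a b => a.1 < b.1)
  | [] => by intro _; simp [rleGroup]
  | d :: rest => by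
    intro hp
    have ht : (rest.dropWhile (· == d)).Pairwise (· ≤ ·) :=
      List.Pairwise.sublist (List.dropWhile_sublist _) hp.tail
    have hgt : ∀ x ∈ rest.dropWhile (· == d), d < x :=
      dropWhile_all_gt d rest hp.tail (fun x hx => (List.pairwise_cons.1 hp).1 x hx)
    rw [rleGroup_cons d rest hp, List.pairwise_cons]
    refine ⟨?_, rleGroup_pairwise _ ht⟩
    intro q hq
    exact hgt q.1 ((mem_rleGroup _ ht q).1 hq).1
  termination_by s => s.length
  decreasing_by
    simp only [List.length_cons]
    exact Nat.lt_succ_of_le (List.length_dropWhile_le _ _)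

-- the heart of the equivalence: sorted items of the counter = run-length groups of the sorted dates
theorem counter_sorted2_eq_rle (L : List String) :
    PySem.List.sorted2 (PySem.Dict.counter L).items Prod.fst Prod.snd false
      = rleGroup (PySem.List.sorted L (fun x => x) false) := by
  have hs : (PySem.List.sorted L (fun x => x) false).Pairwise (· ≤ ·) := by
    have := PySem.List.sorted_pairwise L (fun x => x)
    simpa using this
  have hperm : (PySem.List.sorted L (fun x => x) false).Perm L :=
    PySem.List.sorted_perm L (fun x => x) false
  have hitems := PySem.Dict.items_counter L
  have hfst : ((PySem.Dict.counter L).items.map Prod.fst).Nodup := by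
    rw [hitems, List.map_map]
    have hco : (Prod.fst ∘ fun k => (k, (List.count k L : Int))) = fun k => k := rfl
    rw [hco, List.map_id']
    exact PySem.Set.nodup_ofList L
  rw [sorted2_fst_of_nodup _ hfst]
  apply PySem.List.sorted_eq_of_perm_of_pairwise_lt
  · -- permutation, via nodup + same members
    have hnd1 : (rleGroup (PySem.List.sorted L (fun x => x) false)).Nodup :=
      (rleGroup_pairwise _ hs).imp (fun {a b} hab => by
        intro he; rw [he] at hab; exact lt_irrefl _ hab)
    have hnd2 : ((PySem.Dict.counter L).items).Nodup := by
      rw [hitems]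
      exact (PySem.Set.nodup_ofList L).map (fun a b h => congrArg Prod.fst h)
    rw [List.perm_ext_iff_of_nodup hnd1 hnd2]
    intro p
    rw [mem_rleGroup _ hs p, hitems, List.mem_map]
    constructor
    · rintro ⟨h1, h2⟩
      refine ⟨p.1, (PySem.Set.mem_ofList L p.1).2 (hperm.mem_iff.1 h1), ?_⟩
      rw [← hperm.count_eq, ← h2]
    · rintro ⟨k, hk, he⟩
      have h1 : p.1 = k := by rw [← he]
      subst h1
      refine ⟨hperm.mem_iff.2 ((PySem.Set.mem_ofList L p.1).1 hk), ?_⟩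
      rw [hperm.count_eq]
      exact (congrArg Prod.snd he).symm
  · exact rleGroup_pairwise _ hs

-- the skip-on-missing-key fold over memories is the plain fold over the extracted dates
-- (the library List.foldl_filterMap, restated for pvExtractDate so its matcher fits the ports)
theorem foldl_match_extract {gamma : Type} (g : gamma → String → gamma) :
    ∀ (ms : List (List (String × String))) (init : gamma),
      ms.foldl (fun x mem => match pvExtractDate mem with
        | some date => g x date
        | none => x) init
        = (ms.filterMap pvExtractDate).foldl g init := by
  intro ms
  induction ms with
  | nil => intro _; rfl
  | cons m ms ih =>
    intro init
    cases h : pvExtractDate m <;> simp [h, ih]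

-- ===== VERDICT (by name: the statement is the Claim_ definition above) =====
theorem get_memory_trend_spec : Claim_equal_get_memory_trend := by
  intro memories _
  show get_memory_trend memories = get_memory_trend_alt memories
  unfold get_memory_trend get_memory_trend_alt
  dsimp only
  rw [foldl_match_extract (fun (d : PySem.Dict String Int) date => d.insert date (d.getD date 0 + 1)),
      foldl_match_extract (fun (acc : List String) date => acc ++ [date]),
      PySem.Dict.foldl_insert_getD_add_one_eq_counter,
      PySem.List.foldl_append_singleton, List.nil_append,
      counter_sorted2_eq_rle]
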